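-- pv_equiv track=rewrite | github.com/AftabQuant/Sabudh-Internship | Coding Challenge Week 7/Aftab_PythonAssignment4_27Mar.py | execute_operations
-- ===== SOURCE A (Python) =====
-- class MinStack:
--     def __init__(self):
--         self.stack = []
--         self.min_stack = []
--
--     def push(self, val: int) -> None:
--         self.stack.append(val)
--         if not self.min_stack or val <= self.min_stack[-1]:
--             self.min_stack.append(val)
--
--     def pop(self) -> None:
--         if self.stack:
--             if self.stack[-1] == self.min_stack[-1]:
--                 self.min_stack.pop()
--             self.stack.pop()
--
--     def top(self) -> int:
--         if self.stack:
--             return self.stack[-1]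
--
--     def get_min(self) -> int:
--         if self.min_stack:
--             return self.min_stack[-1]
--
-- def execute_operations(operations, values):
--     results = [None]
--     obj = None
--     for op, val in zip(operations, values):
--         if op == "MinStack":
--             obj = MinStack()
--         elif op == "push":
--             obj.push(val[0])
--         elif op == "pop":
--             obj.pop()
--         elif op == "top":
--             results.append(obj.top())
--         elif op == "getMin":
--             results.append(obj.get_min())
--     return results
-- ===== SOURCE B (Python) =====
-- def execute_operations(operations, values):
--     # Single stack of (value, running_min) pairs instead of two parallel stacks.
--     results = [None]
--     stack = None
--     for op, val in zip(operations, values):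
--         if op == "MinStack":
--             stack = []
--         elif op == "push":
--             v = val[0]
--             m = v if not stack else min(v, stack[-1][1])
--             stack.append((v, m))
--         elif op == "pop":
--             if stack:
--                 stack.pop()
--         elif op == "top":
--             results.append(stack[-1][0] if stack else None)
--         elif op == "getMin":
--             results.append(stack[-1][1] if stack else None)
--     return results
-- ===== Notes on version B (the rewrite author's own statement) =====
-- stated objective: simpler
-- what changed: MinStack's two parallel stacks with conditional min-stack pushes/pops are replaced by a single stack of (value, running-min) pairs, so pop/top/get_min become plain stack operations with no conditional min-stack maintenance.
-- outside the precondition, e.g. on execute_operations(['push'], [[1]]): A raises AttributeError, B raises AttributeError; on execute_operations(['MinStack', 'push'], [[], []]): A raises IndexError, B raises IndexError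
import Mathlib
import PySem

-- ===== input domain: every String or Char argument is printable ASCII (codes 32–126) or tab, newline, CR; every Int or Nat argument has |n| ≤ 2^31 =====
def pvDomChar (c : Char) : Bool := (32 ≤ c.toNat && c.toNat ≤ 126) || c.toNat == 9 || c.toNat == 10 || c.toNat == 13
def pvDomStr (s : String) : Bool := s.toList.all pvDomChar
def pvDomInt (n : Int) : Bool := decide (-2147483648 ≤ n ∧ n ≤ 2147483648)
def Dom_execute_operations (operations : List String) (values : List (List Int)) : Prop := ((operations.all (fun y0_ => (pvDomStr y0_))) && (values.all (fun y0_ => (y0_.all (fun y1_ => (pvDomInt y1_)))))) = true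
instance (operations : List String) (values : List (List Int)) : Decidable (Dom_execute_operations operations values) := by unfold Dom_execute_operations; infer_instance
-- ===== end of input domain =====

-- B replaces A's two parallel stacks by one stack of (value, running-min) pairs (objective: simpler).

-- ===== PORT A =====
-- A's MinStack state is (stack, min_stack); list head = Python list end (top of stack).
def eoPushA (s ms : List Int) (v : Int) : List Int × List Int :=
  (v :: s, if ms = [] ∨ v ≤ ms.headI then v :: ms else ms)

def eoPopA (s ms : List Int) : List Int × List Int :=
  match s with
  | [] => (s, ms)
  | v :: rest =>
    match ms with
    | m :: mr => (rest, if v = m then mr else ms)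
    | [] => (rest, [])   -- unreachable from a fresh MinStack (Python would raise IndexError)

def eoStepA (st : List (Option Int) × Option (List Int × List Int)) (p : String × List Int) :
    List (Option Int) × Option (List Int × List Int) :=
  if p.1 = "MinStack" then (st.1, some ([], []))
  else
    match st.2 with
    | none =>
      -- Python A raises AttributeError here (obj is None); these inputs are outside Pre_.
      if p.1 = "top" ∨ p.1 = "getMin" then (st.1 ++ [none], none) else (st.1, none)
    | some (s, ms) =>
      if p.1 = "push" then
        match p.2 with
        | v :: _ => (st.1, some (eoPushA s ms v))
        | [] => (st.1, some (s, ms))  -- Python raises IndexError (val[0]); outside Pre_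
      else if p.1 = "pop" then (st.1, some (eoPopA s ms))
      else if p.1 = "top" then (st.1 ++ [s.head?], some (s, ms))
      else if p.1 = "getMin" then (st.1 ++ [ms.head?], some (s, ms))
      else (st.1, some (s, ms))

def execute_operations (operations : List String) (values : List (List Int)) : List (Option Int) :=
  ((operations.zip values).foldl eoStepA ([none], none)).1

-- ===== PORT B =====
-- B's state is a single stack of (value, running minimum) pairs, head = top.
def eoStepB (st : List (Option Int) × Option (List (Int × Int))) (p : String × List Int) :
    List (Option Int) × Option (List (Int × Int)) :=
  if p.1 = "MinStack" then (st.1, some [])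
  else if p.1 = "push" then
    match st.2, p.2 with
    | some t, v :: _ =>
      let m := match t with | (_, m0) :: _ => min v m0 | [] => v
      (st.1, some ((v, m) :: t))
    | _, _ => (st.1, st.2)  -- Python B raises here (no object / empty value list); outside Pre_
  else if p.1 = "pop" then
    match st.2 with
    | some (_ :: rest) => (st.1, some rest)
    | _ => (st.1, st.2)
  else if p.1 = "top" then
    (st.1 ++ [match st.2 with | some ((v, _) :: _) => some v | _ => none], st.2)
  else if p.1 = "getMin" then
    (st.1 ++ [match st.2 with | some ((_, m) :: _) => some m | _ => none], st.2)
  else (st.1, st.2)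

def execute_operations_alt (operations : List String) (values : List (List Int)) : List (Option Int) :=
  ((operations.zip values).foldl eoStepB ([none], none)).1

-- ===== PRECONDITION & SPEC =====
-- Pre_ excludes exactly the inputs where Python A raises: an operation "push"/"pop"/"top"/"getMin"
-- before any "MinStack" (AttributeError on None), or a "push" whose value list is empty (IndexError).
def Pre_execute_operations (operations : List String) (values : List (List Int)) : Prop :=
  ∀ p ∈ (operations.zip values).zipIdx,
    (p.1.1 = "push" → p.1.2 ≠ [] ∧ "MinStack" ∈ operations.take p.2) ∧
    ((p.1.1 = "pop" ∨ p.1.1 = "top" ∨ p.1.1 = "getMin") → "MinStack" ∈ operations.take p.2)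
instance (operations : List String) (values : List (List Int)) : Decidable (Pre_execute_operations operations values) := by unfold Pre_execute_operations; infer_instance

def pvWitness_execute_operations : List String × List (List Int) :=
  (["MinStack", "push", "push", "getMin", "pop", "top"], [[], [3], [1], [], [], []])

def Spec_execute_operations (operations : List String) (values : List (List Int)) (out : List (Option Int)) : Prop := out = execute_operations_alt operations values
instance (operations : List String) (values : List (List Int)) (out : List (Option Int)) : Decidable (Spec_execute_operations operations values out) := by unfold Spec_execute_operations; infer_instance

-- ===== CLAIM (what is proved, stated in full; the proofs are below) =====
def Claim_equal_execute_operations : Prop := ∀ (operations : List String) (values : List (List Int)), Dom_execute_operations operations values → Pre_execute_operations operations values → Spec_execute_operations operations values (execute_operations operations values)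

-- ===== LEMMAS AND PROOFS =====

-- A's min_stack, recomputed from the plain stack.
def minsOf : List Int → List Int
  | [] => []
  | v :: r => if minsOf r = [] ∨ v ≤ (minsOf r).headI then v :: minsOf r else minsOf r

-- B's annotated stack, recomputed from the plain stack.
def annot : List Int → List (Int × Int)
  | [] => []
  | v :: r => (v, match annot r with | (_, m0) :: _ => min v m0 | [] => v) :: annot r

theorem head_minsOf_annot (s : List Int) :
    (minsOf s).head? = ((annot s).head?).map Prod.snd := by
  induction s with
  | nil => simp [minsOf, annot]
  | cons v r ih =>
    simp only [minsOf, annot]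
    cases har : annot r with
    | nil =>
      have hr : r = [] := by
        cases r with
        | nil => rfl
        | cons a b => simp [annot] at har
      subst hr
      simp [minsOf]
    | cons x t =>
      have hm : (minsOf r).head? = some x.2 := by rw [ih, har]; rfl
      have hmne : minsOf r ≠ [] := by
        intro h; rw [h] at hm; simp at hm
      have hmh : (minsOf r).headI = x.2 := by
        cases hms : minsOf r with
        | nil => exact absurd hms hmne
        | cons a b => rw [hms] at hm; simp at hm; simp [hm]
      by_cases hle : v ≤ x.2
      · rw [if_pos (Or.inr (by rw [hmh]; exact hle))]
        simp [min_eq_left hle]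
      · rw [if_neg (by push_neg; exact ⟨hmne, by rw [hmh]; omega⟩)]
        rw [hm]
        simp [min_eq_right (le_of_lt (lt_of_not_ge hle))]

theorem eoPushA_minsOf (s : List Int) (v : Int) :
    eoPushA s (minsOf s) v = (v :: s, minsOf (v :: s)) := by
  simp [eoPushA, minsOf]

theorem eoPopA_minsOf (v : Int) (r : List Int) :
    eoPopA (v :: r) (minsOf (v :: r)) = (r, minsOf r) := by
  by_cases hcond : minsOf r = [] ∨ v ≤ (minsOf r).headI
  · simp only [minsOf]
    rw [if_pos hcond]
    simp [eoPopA]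
  · have hne : minsOf r ≠ [] := fun h => hcond (Or.inl h)
    have hgt : ¬ v ≤ (minsOf r).headI := fun h => hcond (Or.inr h)
    cases hms : minsOf r with
    | nil => exact absurd hms hne
    | cons m mr =>
      have hvm : v ≠ m := by
        rw [hms] at hgt; simp [List.headI] at hgt; omega
      simp only [minsOf]
      rw [if_neg hcond, hms]
      simp [eoPopA, hvm]

-- Relation between A's optional object and B's optional stack.
def eoRel : Option (List Int × List Int) → Option (List (Int × Int)) → Prop
  | none, none => True
  | some (s, ms), some t => ms = minsOf s ∧ t = annot s
  | _, _ => False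

theorem eoStep_rel (res : List (Option Int)) (oA : Option (List Int × List Int))
    (oB : Option (List (Int × Int))) (p : String × List Int) (h : eoRel oA oB) :
    (eoStepA (res, oA) p).1 = (eoStepB (res, oB) p).1 ∧
    eoRel (eoStepA (res, oA) p).2 (eoStepB (res, oB) p).2 := by
  by_cases h1 : p.1 = "MinStack"
  · simp [eoStepA, eoStepB, h1, eoRel, minsOf, annot]
  cases oA with
  | none =>
    cases oB with
    | none =>
      by_cases h2 : p.1 = "push" <;> by_cases h3 : p.1 = "pop" <;>
        by_cases h4 : p.1 = "top" <;> by_cases h5 : p.1 = "getMin" <;>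
        simp_all [eoStepA, eoStepB, eoRel]
    | some t => exact absurd h (by simp [eoRel])
  | some sm =>
    cases oB with
    | none => exact absurd h (by cases sm; simp [eoRel])
    | some t =>
      obtain ⟨s, ms⟩ := sm
      obtain ⟨hms, ht⟩ := h
      subst hms; subst ht
      by_cases h2 : p.1 = "push"
      · cases hv : p.2 with
        | nil => simp [eoStepA, eoStepB, h1, h2, hv, eoRel]
        | cons v vr =>
          have hA : eoStepA (res, some (s, minsOf s)) p = (res, some (v :: s, minsOf (v :: s))) := by
            simp [eoStepA, h2, hv, eoPushA_minsOf]
          have hB : eoStepB (res, some (annot s)) p = (res, some (annot (v :: s))) := by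
            simp [eoStepB, h2, hv, annot]
          rw [hA, hB]
          exact ⟨rfl, rfl, rfl⟩
      by_cases h3 : p.1 = "pop"
      · cases s with
        | nil => simp [eoStepA, eoStepB, h1, h2, h3, eoRel, minsOf, annot, eoPopA]
        | cons v r =>
          rw [show eoStepA (res, some (v :: r, minsOf (v :: r))) p =
              (res, some (eoPopA (v :: r) (minsOf (v :: r)))) by
            simp [eoStepA, h1, h2, h3]]
          rw [eoPopA_minsOf]
          constructor
          · simp [eoStepB, h1, h2, h3, annot]
          · simp [eoStepB, h1, h2, h3, annot, eoRel]
      by_cases h4 : p.1 = "top"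
      · constructor
        · cases s with
          | nil => simp [eoStepA, eoStepB, h1, h2, h3, h4, annot]
          | cons v r => simp [eoStepA, eoStepB, h1, h2, h3, h4, annot]
        · simp [eoStepA, eoStepB, h1, h2, h3, h4, eoRel]
      by_cases h5 : p.1 = "getMin"
      · constructor
        · have hh := head_minsOf_annot s
          cases s with
          | nil => simp [eoStepA, eoStepB, h2, h3, h4, h5, minsOf, annot]
          | cons v r =>
            simp only [annot, List.head?_cons, Option.map_some] at hh
            simp [eoStepA, eoStepB, h2, h3, h4, h5, annot, hh]
        · simp [eoStepA, eoStepB, h2, h3, h4, h5, eoRel]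
      · simp [eoStepA, eoStepB, h1, h2, h3, h4, h5, eoRel]

theorem eoFold_rel (ps : List (String × List Int)) :
    ∀ (res : List (Option Int)) (oA : Option (List Int × List Int))
      (oB : Option (List (Int × Int))), eoRel oA oB →
      (ps.foldl eoStepA (res, oA)).1 = (ps.foldl eoStepB (res, oB)).1 := by
  induction ps with
  | nil => intro res oA oB _; rfl
  | cons p rest ih =>
    intro res oA oB h
    have hs := eoStep_rel res oA oB p h
    simp only [List.foldl_cons]
    have e1 : eoStepA (res, oA) p = ((eoStepA (res, oA) p).1, (eoStepA (res, oA) p).2) := rfl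
    have e2 : eoStepB (res, oB) p = ((eoStepB (res, oB) p).1, (eoStepB (res, oB) p).2) := rfl
    rw [e1, e2, hs.1]
    exact ih _ _ _ hs.2

-- ===== VERDICT (by name: the statement is the Claim_ definition above) =====
theorem execute_operations_spec : Claim_equal_execute_operations := by
  intro operations values _ _
  unfold Spec_execute_operations execute_operations execute_operations_alt
  exact eoFold_rel _ _ _ _ trivial
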